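-- pv_equiv track=rewrite | github.com/thor-ns/Python-for-School | Assignments/FinalTest.py | Division_By_3_Not_5
-- ===== SOURCE A (Python) =====
-- def Division_By_3_Not_5(beg, end):
--     numbers = []
--     for i in range(beg, end+1):
--         if i % 3 == 0:
--             if i % 5 == 0:
--                 continue
--             else:
--                 numbers.append(i)
--     return numbers
-- ===== SOURCE B (Python) =====
-- def Division_By_3_Not_5(beg, end):
--     # Enumerate quotients: multiples of 3 in [beg, end] are 3*k for k in [ceil(beg/3), floor(end/3)];
--     # 3*k is divisible by 5 iff k is (3 is invertible mod 5).
--     lo = -((-beg) // 3)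
--     hi = end // 3
--     return [3 * k for k in range(lo, hi + 1) if k % 5 != 0]
-- ===== Notes on version B (the rewrite author's own statement) =====
-- stated objective: faster
-- what changed: B enumerates the quotients k from ceil(beg/3) to floor(end/3), emitting 3*k unless k is divisible by 5, instead of scanning every integer in [beg,end] and testing i % 3.
import Mathlib
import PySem

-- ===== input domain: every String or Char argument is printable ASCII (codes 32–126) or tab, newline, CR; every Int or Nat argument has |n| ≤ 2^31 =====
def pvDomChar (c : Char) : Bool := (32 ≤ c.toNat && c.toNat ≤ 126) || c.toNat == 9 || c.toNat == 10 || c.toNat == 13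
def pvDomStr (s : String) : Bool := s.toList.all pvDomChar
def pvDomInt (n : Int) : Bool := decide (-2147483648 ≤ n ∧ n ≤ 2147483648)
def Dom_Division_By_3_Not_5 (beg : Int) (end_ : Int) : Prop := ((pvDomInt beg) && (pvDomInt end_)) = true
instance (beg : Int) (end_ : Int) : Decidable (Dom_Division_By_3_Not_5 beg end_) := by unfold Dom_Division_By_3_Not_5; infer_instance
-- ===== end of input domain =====

-- B enumerates the quotients k = ceil(beg/3) .. floor(end/3) and emits 3*k unless k % 5 == 0, instead of scanning every integer; objective: faster (constant factor).

-- ===== PORT A =====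
-- the 'for i in range(beg, end+1)' loop as structural recursion on i; divisors 3 and 5 are positive, '%' is PySem.Int.mod
def pvALoop (i e : Int) : List Int :=
  if i ≤ e then
    if PySem.Int.mod i 3 = 0 then
      if PySem.Int.mod i 5 = 0 then pvALoop (i + 1) e
      else i :: pvALoop (i + 1) e
    else pvALoop (i + 1) e
  else []
  termination_by (e + 1 - i).toNat
  decreasing_by all_goals omega

def Division_By_3_Not_5 (beg : Int) (end_ : Int) : List Int := pvALoop beg end_

-- ===== PORT B =====
-- the comprehension '[3*k for k in range(lo, hi+1) if k % 5 != 0]' as filter-then-map over pyRange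
def Division_By_3_Not_5_alt (beg : Int) (end_ : Int) : List Int :=
  ((PySem.List.pyRange (-(PySem.Int.floordiv (-beg) 3)) (PySem.Int.floordiv end_ 3 + 1) 1).filter
    (fun k => PySem.Int.mod k 5 != 0)).map (fun k => 3 * k)

-- ===== PRECONDITION & SPEC =====
def Spec_Division_By_3_Not_5 (beg : Int) (end_ : Int) (out : List Int) : Prop := out = Division_By_3_Not_5_alt beg end_
instance (beg : Int) (end_ : Int) (out : List Int) : Decidable (Spec_Division_By_3_Not_5 beg end_ out) := by unfold Spec_Division_By_3_Not_5; infer_instance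

-- ===== CLAIM (what is proved, stated in full; the proofs are below) =====
def Claim_equal_Division_By_3_Not_5 : Prop := ∀ (beg : Int) (end_ : Int), Dom_Division_By_3_Not_5 beg end_ → Spec_Division_By_3_Not_5 beg end_ (Division_By_3_Not_5 beg end_)

-- ===== LEMMAS AND PROOFS =====
theorem pvLoop_agree (beg e : Int) :
    pvALoop beg e =
      ((PySem.List.pyRange (-(PySem.Int.floordiv (-beg) 3)) (PySem.Int.floordiv e 3 + 1) 1).filter
        (fun k => PySem.Int.mod k 5 != 0)).map (fun k => 3 * k) := by
  have hlo : PySem.Int.floordiv (-beg) 3 = (-beg) / 3 := PySem.Int.floordiv_eq_ediv_of_pos (by omega)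
  have hhi : PySem.Int.floordiv e 3 = e / 3 := PySem.Int.floordiv_eq_ediv_of_pos (by omega)
  have hb3 : PySem.Int.mod beg 3 = beg % 3 := PySem.Int.mod_eq_emod_of_pos (by omega)
  rw [hlo, hhi]
  by_cases h : beg ≤ e
  · have ih := pvLoop_agree (beg + 1) e
    rw [PySem.Int.floordiv_eq_ediv_of_pos (a := -(beg+1)) (by omega),
        PySem.Int.floordiv_eq_ediv_of_pos (a := e) (by omega)] at ih
    by_cases h3 : beg % 3 = 0
    · have hq : -(-beg / 3) = beg / 3 := by omega
      have hq1 : -(-(beg + 1) / 3) = beg / 3 + 1 := by omega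
      have hcons : PySem.List.pyRange (-(-beg / 3)) (e / 3 + 1) 1
          = (-(-beg / 3)) :: PySem.List.pyRange (-(-beg / 3) + 1) (e / 3 + 1) 1 :=
        PySem.List.pyRange_one_cons (by omega)
      have hm5 : PySem.Int.mod (-(-beg / 3)) 5 = (beg / 3) % 5 := by
        rw [PySem.Int.mod_eq_emod_of_pos (by omega), hq]
      rw [hcons]
      unfold pvALoop
      have hb5 : PySem.Int.mod beg 5 = beg % 5 := PySem.Int.mod_eq_emod_of_pos (by omega)
      simp only [h, if_pos, hb3, h3, List.filter_cons, hm5, hb5]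
      by_cases h5 : beg % 5 = 0
      · have h5q : (beg / 3) % 5 = 0 := by omega
        simp only [h5, h5q, bne_self_eq_false, Bool.false_eq_true, if_false, if_pos]
        rw [ih, hq1, hq]
      · have h5' : (beg / 3) % 5 ≠ 0 := by omega
        have hbeq : 3 * (beg / 3) = beg := by omega
        rw [if_neg h5, if_pos (by simpa using h5'), List.map_cons, ih, hq1, hq, hbeq]
    · have hsame : -(-(beg + 1) / 3) = -(-beg / 3) := by omega
      unfold pvALoop
      simp only [h, if_pos, hb3, h3, if_false]
      rw [ih, hsame]
  · have hempty : PySem.List.pyRange (-(-beg / 3)) (e / 3 + 1) 1 = [] :=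
      PySem.List.pyRange_one_eq_nil (by omega)
    rw [hempty]
    unfold pvALoop
    simp [h]
  termination_by (e + 1 - beg).toNat
  decreasing_by omega

-- ===== VERDICT (by name: the statement is the Claim_ definition above) =====
theorem Division_By_3_Not_5_spec : Claim_equal_Division_By_3_Not_5 := by
  intro beg end_ _
  unfold Spec_Division_By_3_Not_5 Division_By_3_Not_5 Division_By_3_Not_5_alt
  exact pvLoop_agree beg end_
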